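-- pv_equiv track=rewrite | github.com/asmaa643/Intro2CS | ex4/hangman.py | filter_words_list
-- ===== SOURCE A (Python) =====
-- def how_many_times(word, letter):
--     """
--     This function gets a word with some letter and returns how many times
--     the letter repeats in the word
--     """
--     times = 0
--     for i in word:
--         if i == letter:
--             times += 1
--     return times
--
-- def same_guessed_letters(word, pattern):
--     """
--     This function gets a word and a pattern and returns if the word has
--     the same revealed letters in the pattern
--     """
--     for i in range(len(word)):
--         if pattern[i] != "_":
--             if word[i] != pattern[i]:
--                 return False
--             count_1 = how_many_times(word, word[i])
--             count_2 = how_many_times(pattern, word[i])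
--             if count_1 != count_2:
--                 return False
--     return True
--
-- def is_there_wrong(word, lst):
--     """
--     This function gets a word with a list of letters and returns if the word
--     has some letter from the list
--     """
--     for letter in lst:
--         if letter in word:
--             return True
--     return False
--
-- def filter_words_list(words, pattern, wrong_guess_lst):
--     """
--     This function gets a words list and returns a filtered one using the
--     revealed letters in the pattern and the wrong guesses
--     """
--     filter_lst = list()
--     for i in range(len(words)):
--         if len(words[i]) != len(pattern):
--             continue
--         if not same_guessed_letters(words[i], pattern):
--             continue
--         if is_there_wrong(words[i], wrong_guess_lst):
--             continue
--         filter_lst.append(words[i])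
--     return filter_lst
-- ===== SOURCE B (Python) =====
-- def filter_words_list(words, pattern, wrong_guess_lst):
--     """Single-pass filter: positional check against the pattern plus a
--     revealed-letter exclusion set, instead of per-letter frequency counting."""
--     n = len(pattern)
--     revealed = {c for c in pattern if c != '_'}
--
--     def ok(word):
--         if len(word) != n:
--             return False
--         for wc, pc in zip(word, pattern):
--             if pc != '_':
--                 if wc != pc:
--                     return False
--             elif wc in revealed:
--                 return False
--         return not any(g in word for g in wrong_guess_lst)
--
--     return [w for w in words if ok(w)]
-- ===== Notes on version B (the rewrite author's own statement) =====
-- stated objective: simpler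
-- what changed: Replaces the per-revealed-letter frequency-count comparison (how_many_times on both word and pattern at every revealed position) with a single zip pass that checks revealed positions for equality and unrevealed positions for non-membership in a precomputed set of revealed letters.
import Mathlib
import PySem

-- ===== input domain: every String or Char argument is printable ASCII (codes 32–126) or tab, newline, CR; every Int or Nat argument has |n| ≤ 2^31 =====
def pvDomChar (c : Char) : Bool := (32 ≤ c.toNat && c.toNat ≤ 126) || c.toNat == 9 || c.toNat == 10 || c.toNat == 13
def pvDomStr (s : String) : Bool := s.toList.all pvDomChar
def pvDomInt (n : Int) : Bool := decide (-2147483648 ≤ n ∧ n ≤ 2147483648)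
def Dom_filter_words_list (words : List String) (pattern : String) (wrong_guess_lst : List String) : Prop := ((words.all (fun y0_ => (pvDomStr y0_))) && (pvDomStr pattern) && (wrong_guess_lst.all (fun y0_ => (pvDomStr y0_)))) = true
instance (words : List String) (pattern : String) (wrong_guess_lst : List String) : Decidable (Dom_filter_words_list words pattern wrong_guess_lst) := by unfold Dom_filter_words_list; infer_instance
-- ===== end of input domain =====

-- B replaces A's per-revealed-letter frequency-count comparison with one zip pass over
-- the positions plus a precomputed set of revealed letters (objective: simpler).

-- ===== PORT A =====
-- Python's 1-character strings (word[i], the chars of the `for i in word` loop) are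
-- represented as Char; equality of 1-char strings is equality of the chars, so exact.
def how_many_times (word : List Char) (letter : Char) : Int :=
  word.foldl (fun times i => if i = letter then times + 1 else times) 0

-- pattern[i] / word[i] via pyGetD: every call site has i in range (filter_words_list
-- only calls this with len(word) = len(pattern)), so the default is never used.
def same_guessed_letters (word pattern : List Char) : Bool :=
  (PySem.List.pyRange 0 word.length 1).all (fun i =>
    if PySem.List.pyGetD pattern i ' ' ≠ '_' then
      decide (PySem.List.pyGetD word i ' ' = PySem.List.pyGetD pattern i ' ') &&
      decide (how_many_times word (PySem.List.pyGetD word i ' ')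
                = how_many_times pattern (PySem.List.pyGetD word i ' '))
    else true)

-- `letter in word` is Python substring containment: PySem.Str.isIn
def is_there_wrong (word : String) (lst : List String) : Bool :=
  lst.any (fun letter => PySem.Str.isIn letter word)

def filter_words_list (words : List String) (pattern : String) (wrong_guess_lst : List String) : List String :=
  (PySem.List.pyRange 0 words.length 1).foldl
    (fun filter_lst i =>
      if (PySem.List.pyGetD words i "").toList.length ≠ pattern.toList.length then filter_lst
      else if ¬ same_guessed_letters (PySem.List.pyGetD words i "").toList pattern.toList then filter_lst
      else if is_there_wrong (PySem.List.pyGetD words i "") wrong_guess_lst then filter_lst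
      else filter_lst ++ [PySem.List.pyGetD words i ""])
    []

-- ===== PORT B =====
-- Source B's `ok` position loop over zip(word, pattern): revealed position ⇒ equality,
-- unrevealed position ⇒ the letter is not a revealed one (early return = short-circuit &&)
def pvOkPositions (revealed : PySem.Set Char) : List (Char × Char) → Bool
  | [] => true
  | (wc, pc) :: rest =>
      if pc ≠ '_' then decide (wc = pc) && pvOkPositions revealed rest
      else !(revealed.contains wc) && pvOkPositions revealed rest

def filter_words_list_alt (words : List String) (pattern : String) (wrong_guess_lst : List String) : List String :=
  let n := pattern.toList.length
  let revealed : PySem.Set Char :=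
    PySem.Set.ofList (pattern.toList.filter (fun c => c ≠ '_'))
  words.filter (fun w =>
    decide (w.toList.length = n) &&
    pvOkPositions revealed (w.toList.zip pattern.toList) &&
    !(wrong_guess_lst.any (fun g => PySem.Str.isIn g w)))

-- ===== PRECONDITION & SPEC =====
def Spec_filter_words_list (words : List String) (pattern : String) (wrong_guess_lst : List String) (out : List String) : Prop := out = filter_words_list_alt words pattern wrong_guess_lst
instance (words : List String) (pattern : String) (wrong_guess_lst : List String) (out : List String) : Decidable (Spec_filter_words_list words pattern wrong_guess_lst out) := by unfold Spec_filter_words_list; infer_instance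

-- ===== CLAIM (what is proved, stated in full; the proofs are below) =====
def Claim_equal_filter_words_list : Prop := ∀ (words : List String) (pattern : String) (wrong_guess_lst : List String), Dom_filter_words_list words pattern wrong_guess_lst → Spec_filter_words_list words pattern wrong_guess_lst (filter_words_list words pattern wrong_guess_lst)

-- ===== LEMMAS AND PROOFS =====

-- how_many_times counts occurrences
theorem pv_hmt_eq_count (w : List Char) (c : Char) :
    how_many_times w c = (w.count c : Int) := by
  suffices h : ∀ (i : Int),
      w.foldl (fun times x => if x = c then times + 1 else times) i
        = i + (w.count c : Int) by
    simpa [how_many_times] using h 0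
  induction w with
  | nil => intro i; simp
  | cons a t ih =>
    intro i
    by_cases hac : a = c <;> simp [List.count_cons, hac, ih] <;> push_cast <;> ring

-- an `all` over range(len) of a positionwise test is an `all` over the zip
theorem pv_all_range_eq_all_zip (f : Char → Char → Bool) (w p : List Char)
    (h : w.length = p.length) :
    ((PySem.List.pyRange 0 (w.length : Int) 1).all fun i =>
        f (PySem.List.pyGetD w i ' ') (PySem.List.pyGetD p i ' '))
      = (w.zip p).all (fun x => f x.1 x.2) := by
  rw [Bool.eq_iff_iff, List.all_eq_true, List.all_eq_true]
  constructor
  · intro H x hx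
    obtain ⟨k, hk, rfl⟩ := List.mem_iff_getElem.1 hx
    have hkw : k < w.length := by
      simp only [List.length_zip] at hk; omega
    have hkp : k < p.length := h ▸ hkw
    have := H (k : Int)
      (by rw [PySem.List.mem_pyRange_one]; exact ⟨Int.natCast_nonneg k, by exact_mod_cast hkw⟩)
    simpa [PySem.List.pyGetD_natCast, List.getD_eq_getElem?_getD,
      List.getElem?_eq_getElem, hkw, hkp, List.getElem_zip] using this
  · intro H i hi
    rw [PySem.List.mem_pyRange_one] at hi
    obtain ⟨h0, hlt⟩ := hi
    have hkw : i.toNat < w.length := by omega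
    have hkp : i.toNat < p.length := h ▸ hkw
    have hz : i.toNat < (w.zip p).length := by simp only [List.length_zip]; omega
    have hx := H ((w.zip p)[i.toNat]) (List.getElem_mem hz)
    rw [List.getElem_zip] at hx
    rw [PySem.List.pyGetD_eq_getElem w ' ' h0 (by exact_mod_cast hlt),
        PySem.List.pyGetD_eq_getElem p ' ' h0 (by exact_mod_cast (h ▸ hlt))]
    exact hx

-- A's position loop, restated over the zip
theorem pv_sgl_eq_all_zip (w p : List Char) (h : w.length = p.length) :
    same_guessed_letters w p
      = (w.zip p).all (fun x =>
          if x.2 ≠ '_' then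
            decide (x.1 = x.2) && decide (how_many_times w x.1 = how_many_times p x.1)
          else true) := by
  unfold same_guessed_letters
  exact pv_all_range_eq_all_zip
    (fun wc pc => if pc ≠ '_' then
        decide (wc = pc) && decide (how_many_times w wc = how_many_times p wc)
      else true) w p h

-- B's position loop as a proposition
theorem pv_okPositions_iff (revealed : PySem.Set Char) (l : List (Char × Char)) :
    pvOkPositions revealed l = true ↔
      ∀ x ∈ l, (x.2 ≠ '_' → x.1 = x.2) ∧ (x.2 = '_' → ¬ revealed.contains x.1 = true) := by
  induction l with
  | nil => simp [pvOkPositions]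
  | cons a t ih =>
    obtain ⟨wc, pc⟩ := a
    by_cases hpc : pc = '_' <;> simp [pvOkPositions, hpc, ih] <;> tauto

-- with matching revealed positions, occurrences in the word split into occurrences in
-- the pattern plus occurrences at '_' positions
theorem pv_countP_split (l : List (Char × Char)) (c : Char) (hc : c ≠ '_')
    (hM : ∀ x ∈ l, x.2 ≠ '_' → x.1 = x.2) :
    l.countP (fun x => x.1 == c)
      = l.countP (fun x => x.2 == c) + l.countP (fun x => x.1 == c && x.2 == '_') := by
  induction l with
  | nil => simp
  | cons a t ih =>
    have hM' : ∀ x ∈ t, x.2 ≠ '_' → x.1 = x.2 :=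
      fun x hx => hM x (List.mem_cons_of_mem _ hx)
    have hrec := ih hM'
    have hc' : ¬ ('_' = c) := fun e => hc e.symm
    by_cases h2 : a.2 = '_'
    · by_cases h1 : a.1 = c <;>
        simp [List.countP_cons, h1, h2, hc, hc', hrec] <;> omega
    · have h12 : a.1 = a.2 := hM a List.mem_cons_self h2
      by_cases h1 : a.1 = c
      · have h2c : a.2 = c := h12 ▸ h1
        simp [List.countP_cons, h1, h2, h2c, hc, hc', hrec]
        omega
      · have h2c : ¬ (a.2 = c) := fun hcc => h1 (h12.trans hcc)
        simp [List.countP_cons, h1, h2, h2c, hc, hc', hrec]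

-- counts of the two strings read off the zip
theorem pv_count_fst (w p : List Char) (h : w.length = p.length) (c : Char) :
    w.count c = (w.zip p).countP (fun x => x.1 == c) := by
  conv_lhs => rw [← List.map_fst_zip (l₁ := w) (l₂ := p) (le_of_eq h)]
  rw [List.count_eq_countP, List.countP_map]
  rfl

theorem pv_count_snd (w p : List Char) (h : w.length = p.length) (c : Char) :
    p.count c = (w.zip p).countP (fun x => x.2 == c) := by
  conv_lhs => rw [← List.map_snd_zip (l₁ := w) (l₂ := p) (le_of_eq h.symm)]
  rw [List.count_eq_countP, List.countP_map]
  rfl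

-- the central per-word equivalence
theorem pv_sgl_eq_ok (w p : List Char) (h : w.length = p.length) :
    same_guessed_letters w p
      = pvOkPositions (PySem.Set.ofList (p.filter (fun c => c ≠ '_'))) (w.zip p) := by
  have hcont : ∀ c : Char,
      (PySem.Set.ofList (p.filter (fun c => c ≠ '_'))).contains c = true ↔ (c ∈ p ∧ c ≠ '_') := by
    intro c
    rw [PySem.Set.contains_iff, PySem.Set.mem_ofList, List.mem_filter]
    simp
  rw [pv_sgl_eq_all_zip w p h, Bool.eq_iff_iff, List.all_eq_true, pv_okPositions_iff]
  constructor
  · intro A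
    have M : ∀ x ∈ w.zip p, x.2 ≠ '_' → x.1 = x.2 := by
      intro x hx hne
      have := A x hx
      rw [if_pos hne] at this
      exact of_decide_eq_true (Bool.and_elim_left this)
    intro x hx
    refine ⟨M x hx, fun hund hcontains => ?_⟩
    rw [hcont] at hcontains
    obtain ⟨hmemp, hne'⟩ := hcontains
    have : x.1 ∈ List.map Prod.snd (w.zip p) := by
      rw [List.map_snd_zip (le_of_eq h.symm)]; exact hmemp
    obtain ⟨y, hy, hy2⟩ := List.mem_map.1 this
    have hAy := A y hy
    rw [if_pos (hy2 ▸ hne')] at hAy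
    have hy12 : y.1 = y.2 := of_decide_eq_true (Bool.and_elim_left hAy)
    have hcounts : how_many_times w y.1 = how_many_times p y.1 :=
      of_decide_eq_true (Bool.and_elim_right hAy)
    rw [pv_hmt_eq_count, pv_hmt_eq_count] at hcounts
    have hcn : w.count y.1 = p.count y.1 := by exact_mod_cast hcounts
    rw [pv_count_fst w p h, pv_count_snd w p h] at hcn
    have hy1ne : y.1 ≠ '_' := by rw [hy12, hy2]; exact hne'
    have hsplit := pv_countP_split (w.zip p) y.1 hy1ne M
    have hzero : (w.zip p).countP (fun z => z.1 == y.1 && z.2 == '_') = 0 := by omega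
    have := List.countP_eq_zero.1 hzero x hx
    apply this
    have hx1 : x.1 = y.1 := by rw [hy12, hy2]
    simp [hx1, hund]
  · intro B x hx
    by_cases hne : x.2 = '_'
    · rw [if_neg (by simp [hne])]
    rw [if_pos hne]
    have M : ∀ z ∈ w.zip p, z.2 ≠ '_' → z.1 = z.2 := fun z hz => (B z hz).1
    have hx12 : x.1 = x.2 := M x hx hne
    have hc : x.1 ≠ '_' := hx12 ▸ hne
    have hsplit := pv_countP_split (w.zip p) x.1 hc M
    have hzero : (w.zip p).countP (fun z => z.1 == x.1 && z.2 == '_') = 0 := by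
      rw [List.countP_eq_zero]
      intro z hz hzp
      simp only [Bool.and_eq_true, beq_iff_eq] at hzp
      obtain ⟨hz1, hz2⟩ := hzp
      apply (B z hz).2 hz2
      rw [hcont, hz1]
      refine ⟨?_, hc⟩
      have : x.2 ∈ List.map Prod.snd (w.zip p) := List.mem_map_of_mem hx
      rw [List.map_snd_zip (le_of_eq h.symm)] at this
      exact hx12.symm ▸ this
    have hcn : w.count x.1 = p.count x.1 := by
      rw [pv_count_fst w p h, pv_count_snd w p h]; omega
    have : how_many_times w x.1 = how_many_times p x.1 := by
      rw [pv_hmt_eq_count, pv_hmt_eq_count]; exact_mod_cast hcn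
    simp only [Bool.and_eq_true, decide_eq_true_eq]
    exact ⟨hx12, this⟩

theorem pv_main (words : List String) (pattern : String) (wrong_guess_lst : List String) :
    filter_words_list words pattern wrong_guess_lst
      = filter_words_list_alt words pattern wrong_guess_lst := by
  have h1 : filter_words_list words pattern wrong_guess_lst
      = words.foldl (fun acc wi =>
          if wi.toList.length ≠ pattern.toList.length then acc
          else if ¬ same_guessed_letters wi.toList pattern.toList then acc
          else if is_there_wrong wi wrong_guess_lst then acc
          else acc ++ [wi]) [] :=
    PySem.List.foldl_pyRange_zero_pyGetD' words ""
      (fun acc wi =>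
        if wi.toList.length ≠ pattern.toList.length then acc
        else if ¬ same_guessed_letters wi.toList pattern.toList then acc
        else if is_there_wrong wi wrong_guess_lst then acc
        else acc ++ [wi]) []
  rw [h1]
  have hbody : (fun (acc : List String) (wi : String) =>
        if wi.toList.length ≠ pattern.toList.length then acc
        else if ¬ same_guessed_letters wi.toList pattern.toList then acc
        else if is_there_wrong wi wrong_guess_lst then acc
        else acc ++ [wi])
      = (fun acc wi =>
        if (decide (wi.toList.length = pattern.toList.length) &&
            pvOkPositions (PySem.Set.ofList (pattern.toList.filter (fun c => c ≠ '_')))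
              (wi.toList.zip pattern.toList) &&
            !(wrong_guess_lst.any (fun g => PySem.Str.isIn g wi))) = true
        then acc ++ [wi] else acc) := by
    funext acc wi
    by_cases hlen : wi.toList.length = pattern.toList.length
    · rw [if_neg (by simp [hlen])]
      rw [pv_sgl_eq_ok wi.toList pattern.toList hlen,
        show is_there_wrong wi wrong_guess_lst
            = wrong_guess_lst.any (fun g => PySem.Str.isIn g wi) from rfl]
      generalize pvOkPositions (PySem.Set.ofList (pattern.toList.filter (fun c => c ≠ '_')))
          (wi.toList.zip pattern.toList) = ok
      generalize wrong_guess_lst.any (fun g => PySem.Str.isIn g wi) = b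
      cases ok <;> cases b <;> simp [hlen]
    · have hdl : decide (wi.toList.length = pattern.toList.length) = false := decide_eq_false hlen
      rw [if_pos hlen, hdl]
      simp
  rw [hbody, PySem.List.foldl_append_if_eq_filter, List.nil_append]
  rfl

-- ===== VERDICT (by name: the statement is the Claim_ definition above) =====
theorem filter_words_list_spec : Claim_equal_filter_words_list := by
  intro words pattern wrong _
  exact (pv_main words pattern wrong).symm ▸ rfl
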